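-- pv_equiv track=rewrite | github.com/BasmaKasmi/99_problems | tux/main.py | tux__
-- ===== SOURCE A (Python) =====
-- def tux__(numbers: list[int]):
--     if numbers != []:
--         numbers.insert(0,min(numbers)-1)
--         numbers.append(max(numbers)+1)
--         for i in range(1,len(numbers)-1):
--             if numbers[i] > max(numbers[:i]) and numbers[i] <= min(numbers[i:]) :
--                 return i-1
--     return -1
-- ===== SOURCE B (Python) =====
-- def tux__(numbers: list[int]):
--     # O(n): suffix-min array built right-to-left, then one scan keeping a running prefix max.
--     # Does not mutate its argument (unlike A, which inserts/appends sentinels in place);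
--     # the equivalence claimed is about the return value only.
--     sufmin = []
--     m = None
--     for x in reversed(numbers):
--         m = x if m is None else min(m, x)
--         sufmin.append(m)
--     sufmin.reverse()
--     pm = None
--     for j, (x, s) in enumerate(zip(numbers, sufmin)):
--         if (pm is None or x > pm) and x <= s:
--             return j
--         pm = x if pm is None else max(pm, x)
--     return -1
-- ===== Notes on version B (the rewrite author's own statement) =====
-- stated objective: faster
-- what changed: Replaced the quadratic scan that recomputes max(prefix)/min(suffix) with slices at every index (after mutating the list with sentinel values) by a linear pass: a suffix-min array built right-to-left plus a running prefix max; B also leaves the input list unmutated.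
import Mathlib
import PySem

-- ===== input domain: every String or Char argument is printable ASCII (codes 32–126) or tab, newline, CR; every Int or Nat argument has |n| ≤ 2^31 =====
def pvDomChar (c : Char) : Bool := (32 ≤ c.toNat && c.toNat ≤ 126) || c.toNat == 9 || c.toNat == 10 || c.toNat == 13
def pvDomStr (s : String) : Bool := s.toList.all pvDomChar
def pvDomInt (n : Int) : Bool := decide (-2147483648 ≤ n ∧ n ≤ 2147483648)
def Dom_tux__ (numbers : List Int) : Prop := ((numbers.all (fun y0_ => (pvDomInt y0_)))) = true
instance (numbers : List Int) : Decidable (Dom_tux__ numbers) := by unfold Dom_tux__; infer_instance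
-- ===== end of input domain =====

-- B replaces A's quadratic slice-based rescans (after in-place sentinel insertion) by an O(n)
-- suffix-min array plus a running prefix max; A mutates its argument in place, B does not —
-- the equivalence proved here is about the return value only.

-- ===== PORT A =====
-- loop 'for i in range(1, len(numbers)-1): if numbers[i] > max(numbers[:i]) and numbers[i] <= min(numbers[i:]): return i-1'
-- the catch-all branch is unreachable for the indices the loop produces (Python would raise there)
def tuxALoop (xs : List Int) : List Int → Int
  | [] => -1
  | i :: rest =>
    match PySem.List.pyGet? xs i,
          PySem.List.max? (PySem.List.slice xs none (some i)) (fun y => y),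
          PySem.List.min? (PySem.List.slice xs (some i) none) (fun y => y) with
    | some v, some mx, some mn =>
        if v > mx ∧ v ≤ mn then i - 1 else tuxALoop xs rest
    | _, _, _ => -1

def tux__ (numbers : List Int) : Int :=
  if numbers ≠ [] then
    let xs1 : List Int := (((PySem.List.min? numbers (fun y => y)).getD 0) - 1) :: numbers
    let xs2 : List Int := xs1 ++ [((PySem.List.max? xs1 (fun y => y)).getD 0) + 1]
    tuxALoop xs2 (PySem.List.pyRange 1 ((xs2.length : Int) - 1) 1)
  else -1

-- ===== PORT B =====
-- 'm = x if m is None else min(m, x); sufmin.append(m)' over reversed(numbers), then sufmin.reverse()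
def tuxBStep (st : Option Int × List Int) (x : Int) : Option Int × List Int :=
  let m : Int := match st.1 with | none => x | some m0 => min m0 x
  (some m, st.2 ++ [m])

-- 'pm is None or x > pm'
def pmLt (pm : Option Int) (x : Int) : Bool :=
  match pm with | none => true | some p => decide (p < x)

-- 'pm = x if pm is None else max(pm, x)'
def pmUpd (pm : Option Int) (x : Int) : Int :=
  match pm with | none => x | some p => max p x

-- 'for j, (x, s) in enumerate(zip(numbers, sufmin)): …'
def tuxBLoop (pm : Option Int) (j : Int) : List (Int × Int) → Int
  | [] => -1
  | (x, s) :: rest =>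
    if pmLt pm x && decide (x ≤ s) then j
    else tuxBLoop (some (pmUpd pm x)) (j + 1) rest

def tux___alt (numbers : List Int) : Int :=
  let sufmin : List Int := ((numbers.reverse.foldl tuxBStep (none, [])).2).reverse
  tuxBLoop none 0 (numbers.zip sufmin)

-- ===== PRECONDITION & SPEC =====
def Spec_tux__ (numbers : List Int) (out : Int) : Prop := out = tux___alt numbers
instance (numbers : List Int) (out : Int) : Decidable (Spec_tux__ numbers out) := by unfold Spec_tux__; infer_instance

-- ===== CLAIM (what is proved, stated in full; the proofs are below) =====
def Claim_equal_tux__ : Prop := ∀ (numbers : List Int), Dom_tux__ numbers → Spec_tux__ numbers (tux__ numbers)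

-- ===== LEMMAS AND PROOFS =====

-- reference loop: first index j with (all earlier elements < x) and (x ≤ all later elements)
def goRef (pm : Option Int) (j : Int) : List Int → Int
  | [] => -1
  | x :: rest =>
    if pmLt pm x = true ∧ ∀ y ∈ rest, x ≤ y then j
    else goRef (some (pmUpd pm x)) (j + 1) rest

-- suffix minima: smins (x :: t) starts with min of (x :: t)
def smins : List Int → List Int
  | [] => []
  | x :: t => t.foldl min x :: smins t

def omin (m : Option Int) (x : Int) : Int :=
  match m with | none => x | some m0 => min m0 x

def pmins : Option Int → List Int → List Int
  | _, [] => []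
  | m, x :: t => omin m x :: pmins (some (omin m x)) t

def ominFold (m : Option Int) (l : List Int) : Option Int :=
  l.foldl (fun o y => some (omin o y)) m

def omax? : List Int → Option Int
  | [] => none
  | h :: t => some (t.foldl max h)

-- ---- fold-min / fold-max algebra ----

theorem le_foldl_min_iff (l : List Int) (a b : Int) :
    a ≤ l.foldl min b ↔ a ≤ b ∧ ∀ y ∈ l, a ≤ y := by
  induction l generalizing b with
  | nil => simp
  | cons y t ih => simp [List.foldl_cons, ih]; tauto

theorem foldl_max_lt_iff (l : List Int) (a b : Int) :
    l.foldl max b < a ↔ b < a ∧ ∀ y ∈ l, y < a := by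
  induction l generalizing b with
  | nil => simp
  | cons y t ih => simp [List.foldl_cons, ih]; tauto

theorem foldl_min_comm_acc (l : List Int) (x y : Int) :
    min (l.foldl min y) x = l.foldl min (min y x) := by
  induction l generalizing y with
  | nil => simp
  | cons z t ih =>
    simp only [List.foldl_cons]
    rw [ih]
    congr 1
    omega

theorem foldl_min_reverse (l : List Int) (b : Int) :
    l.reverse.foldl min b = l.foldl min b := by
  induction l generalizing b with
  | nil => simp
  | cons y t ih =>
    simp only [List.reverse_cons, List.foldl_append, List.foldl_cons, List.foldl_nil]
    rw [ih, foldl_min_comm_acc]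

theorem ominFold_some (l : List Int) (y : Int) :
    ominFold (some y) l = some (l.foldl min y) := by
  induction l generalizing y with
  | nil => rfl
  | cons z t ih => simp [ominFold, List.foldl_cons, omin] at ih ⊢; exact ih (min y z)

-- ---- the built sufmin list equals smins ----

theorem foldl_tuxBStep (l : List Int) (st : Option Int × List Int) :
    (l.foldl tuxBStep st).2 = st.2 ++ pmins st.1 l := by
  induction l generalizing st with
  | nil => simp [pmins]
  | cons x t ih =>
    simp only [List.foldl_cons, tuxBStep, pmins]
    rw [ih]
    cases st.1 <;> simp [omin]

theorem pmins_append (m : Option Int) (a b : List Int) :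
    pmins m (a ++ b) = pmins m a ++ pmins (ominFold m a) b := by
  induction a generalizing m with
  | nil => simp [pmins, ominFold]
  | cons x t ih =>
    simp [pmins, ih, ominFold]

theorem pmins_reverse_eq_smins (l : List Int) :
    (pmins none l.reverse).reverse = smins l := by
  induction l with
  | nil => rfl
  | cons x t ih =>
    simp only [List.reverse_cons, pmins_append, List.reverse_append, smins]
    have h1 : pmins (ominFold none t.reverse) [x] = [omin (ominFold none t.reverse) x] := by
      cases ominFold none t.reverse <;> rfl
    rw [h1]
    simp only [List.reverse_cons, List.reverse_nil, List.nil_append, List.singleton_append]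
    rw [ih]
    congr 1
    cases ht : t.reverse with
    | nil =>
      have : t = [] := by simpa using congrArg List.reverse ht
      subst this; rfl
    | cons y s =>
      have ht' : t = (y :: s).reverse := by
        have := congrArg List.reverse ht; simpa using this
      simp only [ominFold, List.foldl_cons]
      rw [show (List.foldl (fun o y => some (omin o y)) (some (omin none y)) s) =
            ominFold (some (omin none y)) s from rfl, ominFold_some]
      simp only [omin]
      rw [ht', List.reverse_cons, List.foldl_append, List.foldl_cons, List.foldl_nil,
          foldl_min_reverse, foldl_min_comm_acc, foldl_min_comm_acc, min_comm x y]

-- ---- B loop equals the reference loop ----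

theorem tuxBLoop_eq_goRef (t : List Int) (pm : Option Int) (j : Int) :
    tuxBLoop pm j (t.zip (smins t)) = goRef pm j t := by
  induction t generalizing pm j with
  | nil => rfl
  | cons x r ih =>
    simp only [smins, List.zip_cons_cons, tuxBLoop, goRef]
    have hc : (pmLt pm x && decide (x ≤ r.foldl min x)) = true ↔
        (pmLt pm x = true ∧ ∀ y ∈ r, x ≤ y) := by
      rw [Bool.and_eq_true, decide_eq_true_iff, le_foldl_min_iff]
      constructor
      · rintro ⟨h1, _, h2⟩; exact ⟨h1, h2⟩
      · rintro ⟨h1, h2⟩; exact ⟨h1, le_refl x, h2⟩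
    by_cases h : pmLt pm x = true ∧ ∀ y ∈ r, x ≤ y
    · rw [if_pos (hc.mpr h), if_pos h]
    · rw [if_neg (fun hb => h (hc.mp hb)), if_neg h]
      exact ih _ _

theorem tux___alt_eq_goRef (numbers : List Int) :
    tux___alt numbers = goRef none 0 numbers := by
  unfold tux___alt
  rw [foldl_tuxBStep]
  simp only [List.nil_append]
  rw [pmins_reverse_eq_smins]
  exact tuxBLoop_eq_goRef numbers none 0

-- ---- A loop equals the reference loop ----

theorem pmLt_omax? (pre : List Int) (x : Int) :
    pmLt (omax? pre) x = true ↔ ∀ y ∈ pre, y < x := by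
  cases pre with
  | nil => simp [omax?, pmLt]
  | cons h t =>
    simp only [omax?, pmLt, decide_eq_true_iff, foldl_max_lt_iff]
    simp

theorem omax?_append (pre : List Int) (x : Int) :
    omax? (pre ++ [x]) = some (pmUpd (omax? pre) x) := by
  cases pre with
  | nil => rfl
  | cons h t => simp [omax?, pmUpd, List.foldl_append]

theorem tuxALoop_eq_goRef (s0 sN : Int) (suf : List Int) : ∀ (pre : List Int),
    (∀ y ∈ pre ++ suf, s0 < y) → (∀ y ∈ pre ++ suf, y < sN) →
    tuxALoop (s0 :: (pre ++ suf) ++ [sN])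
        (PySem.List.pyRange ((pre.length : Int) + 1) ((pre.length : Int) + (suf.length : Int) + 1) 1)
      = goRef (omax? pre) (pre.length : Int) suf := by
  induction suf with
  | nil =>
    intro pre _ _
    rw [PySem.List.pyRange_one_eq_nil (by simp)]
    rfl
  | cons x r ih =>
    intro pre hs0 hsN
    have hxmem : x ∈ pre ++ x :: r := by simp
    rw [PySem.List.pyRange_one_cons (by simp only [List.length_cons]; push_cast; omega)]
    have hshape : s0 :: (pre ++ x :: r) ++ [sN]
        = (s0 :: pre) ++ (x :: (r ++ [sN])) := by simp
    rw [hshape]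
    have hget : PySem.List.pyGet? ((s0 :: pre) ++ (x :: (r ++ [sN]))) ((pre.length : Int) + 1)
        = some x := by
      have := PySem.List.pyGet?_append_length (pre := s0 :: pre) (y := x) (ys := r ++ [sN])
      simp only [List.length_cons, Nat.cast_add, Nat.cast_one] at this; exact this
    have htake : PySem.List.slice ((s0 :: pre) ++ (x :: (r ++ [sN]))) none
        (some ((pre.length : Int) + 1)) = s0 :: pre := by
      have h1 : ((pre.length : Int) + 1) = (((pre.length + 1 : Nat)) : Int) := by push_cast; ring
      rw [h1, PySem.List.slice_to_natCast]
      have h2 : (pre.length + 1) = (s0 :: pre).length := by simp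
      rw [h2, List.take_left]
    have hdrop : PySem.List.slice ((s0 :: pre) ++ (x :: (r ++ [sN])))
        (some ((pre.length : Int) + 1)) none = x :: (r ++ [sN]) := by
      have h1 : ((pre.length : Int) + 1) = (((pre.length + 1 : Nat)) : Int) := by push_cast; ring
      rw [h1, PySem.List.slice_from_natCast]
      have h2 : (pre.length + 1) = (s0 :: pre).length := by simp
      rw [h2, List.drop_left]
    rw [show tuxALoop ((s0 :: pre) ++ (x :: (r ++ [sN])))
          (((pre.length : Int) + 1) :: PySem.List.pyRange ((pre.length : Int) + 1 + 1) ((pre.length : Int) + ((x :: r).length : Int) + 1) 1)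
        = match PySem.List.pyGet? ((s0 :: pre) ++ (x :: (r ++ [sN]))) ((pre.length : Int) + 1),
            PySem.List.max? (PySem.List.slice ((s0 :: pre) ++ (x :: (r ++ [sN]))) none (some ((pre.length : Int) + 1))) (fun y => y),
            PySem.List.min? (PySem.List.slice ((s0 :: pre) ++ (x :: (r ++ [sN]))) (some ((pre.length : Int) + 1)) none) (fun y => y) with
          | some v, some mx, some mn =>
              if v > mx ∧ v ≤ mn then ((pre.length : Int) + 1) - 1
              else tuxALoop ((s0 :: pre) ++ (x :: (r ++ [sN]))) (PySem.List.pyRange ((pre.length : Int) + 1 + 1) ((pre.length : Int) + ((x :: r).length : Int) + 1) 1)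
          | _, _, _ => -1 from rfl]
    rw [hget, htake, hdrop, PySem.List.max?_id_cons, PySem.List.min?_id_cons]
    simp only []
    have hcond : (x > List.foldl max s0 pre ∧ x ≤ List.foldl min x (r ++ [sN])) ↔
        (pmLt (omax? pre) x = true ∧ ∀ y ∈ r, x ≤ y) := by
      rw [show (x > List.foldl max s0 pre) = (List.foldl max s0 pre < x) from rfl,
          foldl_max_lt_iff, le_foldl_min_iff, pmLt_omax?]
      constructor
      · rintro ⟨⟨_, h1⟩, _, h2⟩
        exact ⟨h1, fun y hy => h2 y (by simp [hy])⟩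
      · rintro ⟨h1, h2⟩
        refine ⟨⟨hs0 x hxmem, h1⟩, le_refl x, ?_⟩
        intro y hy
        rcases List.mem_append.mp hy with hy | hy
        · exact h2 y hy
        · have : y = sN := by simpa using hy
          subst this
          exact le_of_lt (hsN x hxmem)
    by_cases h : pmLt (omax? pre) x = true ∧ ∀ y ∈ r, x ≤ y
    · rw [if_pos (hcond.mpr h)]
      simp only [goRef, if_pos h]
      ring
    · rw [if_neg (fun hb => h (hcond.mp hb))]
      simp only [goRef, if_neg h]
      have hassoc : pre ++ x :: r = (pre ++ [x]) ++ r := by simp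
      have ihspec := ih (pre ++ [x])
          (by intro y hy; exact hs0 y (by rw [hassoc]; exact hy))
          (by intro y hy; exact hsN y (by rw [hassoc]; exact hy))
      rw [omax?_append] at ihspec
      have hlen : (((pre ++ [x]).length : Int)) = (pre.length : Int) + 1 := by simp
      rw [hlen] at ihspec
      rw [show s0 :: ((pre ++ [x]) ++ r) ++ [sN] = (s0 :: pre) ++ (x :: (r ++ [sN])) from by simp] at ihspec
      rw [show ((pre.length : Int) + ((x :: r).length : Int) + 1)
            = ((pre.length : Int) + 1 + (r.length : Int) + 1) from by
          simp only [List.length_cons]; push_cast; ring]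
      exact ihspec

theorem tux___eq_goRef (numbers : List Int) :
    tux__ numbers = goRef none 0 numbers := by
  cases numbers with
  | nil => rfl
  | cons h t =>
    have hmin := PySem.List.foldl_min_le t h
    have hmax := PySem.List.le_foldl_max ((h :: t) : List Int) (t.foldl min h - 1)
    have hs0 : ∀ y ∈ ([] : List Int) ++ h :: t, t.foldl min h - 1 < y := by
      intro y hy
      simp only [List.nil_append] at hy
      rcases List.mem_cons.mp hy with rfl | hy
      · omega
      · have := hmin.2 y hy; omega
    have hsN : ∀ y ∈ ([] : List Int) ++ h :: t,
        y < (h :: t).foldl max (t.foldl min h - 1) + 1 := by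
      intro y hy
      simp only [List.nil_append] at hy
      have := hmax.2 y hy; omega
    have key := tuxALoop_eq_goRef (t.foldl min h - 1)
        ((h :: t).foldl max (t.foldl min h - 1) + 1) (h :: t) [] hs0 hsN
    simp only [List.nil_append, List.length_nil, Nat.cast_zero, zero_add, omax?] at key
    unfold tux__
    rw [if_pos (by simp)]
    simp only [PySem.List.min?_id_cons, PySem.List.max?_id_cons, Option.getD_some]
    convert key using 2
    all_goals congr 1
    all_goals simp only [List.length_append, List.length_cons, List.length_nil]
    all_goals push_cast
    all_goals omega

-- ===== VERDICT (by name: the statement is the Claim_ definition above) =====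
theorem tux___spec : Claim_equal_tux__ := by
  intro numbers _
  unfold Spec_tux__
  rw [tux___eq_goRef, tux___alt_eq_goRef]
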